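-- pv_equiv track=rewrite | github.com/ahmshahparan/per-scholas-azari-leaderboard | lib/gamification.py | detect_follow_up_questions
-- ===== SOURCE A (Python) =====
-- def detect_follow_up_questions(interactions, user_email):
--     """Detect follow-up questions for a specific user"""
--     user_interactions = [i for i in interactions if i.get('email') == user_email]
--     user_interactions.sort(key=lambda x: x.get('created', ''))
--
--     follow_ups = 0
--
--     # Group by course/conversation and look for sequential interactions
--     course_groups = {}
--     for interaction in user_interactions:
--         course_id = interaction.get('course_id', 'unknown')
--         if course_id not in course_groups:
--             course_groups[course_id] = []
--         course_groups[course_id].append(interaction)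
--
--     # Count follow-ups within each course
--     for course_interactions in course_groups.values():
--         if len(course_interactions) > 1:
--             # Consider interactions within 2 hours as potential follow-ups
--             for i in range(1, len(course_interactions)):
--                 follow_ups += 1
--
--     return follow_ups
-- ===== SOURCE B (Python) =====
-- def detect_follow_up_questions(interactions, user_email):
--     """Detect follow-up questions for a specific user"""
--     total = 0
--     courses = set()
--     for interaction in interactions:
--         if interaction.get('email') == user_email:
--             total += 1
--             courses.add(interaction.get('course_id', 'unknown'))
--     return total - len(courses)
-- ===== Notes on version B (the rewrite author's own statement) =====
-- stated objective: simpler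
-- what changed: replaces filter + sort + dict-grouping + per-group counting loops by a single pass that counts matching interactions and collects their distinct course_ids, returning total minus distinct (sum over groups of len-1 = total - #groups)
import Mathlib
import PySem

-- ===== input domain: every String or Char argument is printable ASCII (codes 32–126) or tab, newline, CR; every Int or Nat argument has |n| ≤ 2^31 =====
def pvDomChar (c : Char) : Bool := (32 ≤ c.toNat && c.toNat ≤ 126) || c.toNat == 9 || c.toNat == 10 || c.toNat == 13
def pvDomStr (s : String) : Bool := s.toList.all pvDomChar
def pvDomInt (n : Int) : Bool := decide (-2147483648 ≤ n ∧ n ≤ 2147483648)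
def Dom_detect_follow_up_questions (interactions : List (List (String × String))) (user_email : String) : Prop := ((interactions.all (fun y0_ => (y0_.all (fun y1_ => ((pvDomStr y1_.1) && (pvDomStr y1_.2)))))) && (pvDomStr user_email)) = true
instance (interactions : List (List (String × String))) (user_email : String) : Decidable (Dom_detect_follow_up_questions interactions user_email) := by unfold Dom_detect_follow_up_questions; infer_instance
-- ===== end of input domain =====

-- B is simpler: one pass counting matching interactions and their distinct course_ids
-- (total - #distinct) instead of filter + sort + dict-grouping + per-group counting.

-- ===== PORT A =====
def detect_follow_up_questions (interactions : List (List (String × String))) (user_email : String) : Int :=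
  let user_interactions := interactions.filter (fun i => (PySem.Dict.mk i).get? "email" == some user_email)
  let user_interactions := PySem.List.sorted user_interactions (fun x => (PySem.Dict.mk x).getD "created" "") false
  let follow_ups : Int := 0
  let course_groups : PySem.Dict String (List (List (String × String))) :=
    user_interactions.foldl (fun d interaction =>
      let course_id := (PySem.Dict.mk interaction).getD "course_id" "unknown"
      let d := if d.contains course_id then d else d.insert course_id []
      d.modify course_id [] (fun g => g ++ [interaction])) PySem.Dict.empty
  course_groups.values.foldl (fun follow_ups course_interactions =>
    if course_interactions.length > 1 then
      (PySem.List.pyRange 1 (course_interactions.length : Int) 1).foldl (fun fu _ => fu + 1) follow_ups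
    else follow_ups) follow_ups

-- ===== PORT B =====
def detect_follow_up_questions_alt (interactions : List (List (String × String))) (user_email : String) : Int :=
  let st : Int × PySem.Set String :=
    interactions.foldl (fun st interaction =>
      if (PySem.Dict.mk interaction).get? "email" == some user_email then
        (st.1 + 1, PySem.Set.add st.2 ((PySem.Dict.mk interaction).getD "course_id" "unknown"))
      else st) (0, PySem.Set.empty)
  st.1 - PySem.Set.len st.2

-- ===== PRECONDITION & SPEC =====
def Spec_detect_follow_up_questions (interactions : List (List (String × String))) (user_email : String) (out : Int) : Prop := out = detect_follow_up_questions_alt interactions user_email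
instance (interactions : List (List (String × String))) (user_email : String) (out : Int) : Decidable (Spec_detect_follow_up_questions interactions user_email out) := by unfold Spec_detect_follow_up_questions; infer_instance

-- ===== CLAIM (what is proved, stated in full; the proofs are below) =====
def Claim_equal_detect_follow_up_questions : Prop := ∀ (interactions : List (List (String × String))) (user_email : String), Dom_detect_follow_up_questions interactions user_email → Spec_detect_follow_up_questions interactions user_email (detect_follow_up_questions interactions user_email)

-- ===== LEMMAS AND PROOFS =====

-- abbreviations for the two per-interaction projections
def pvCid (i : List (String × String)) : String := (PySem.Dict.mk i).getD "course_id" "unknown"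
def pvMatch (user_email : String) (i : List (String × String)) : Bool :=
  (PySem.Dict.mk i).get? "email" == some user_email

-- A's conditional-insert-then-append step is just `modify` (modify inserts absent keys itself)
theorem pv_step_eq {ν : Type} [Inhabited ν] (d : PySem.Dict String (List ν)) (k : String) (i : ν) :
    ((if d.contains k then d else d.insert k []).modify k [] (fun g => g ++ [i]))
      = d.modify k [] (fun g => g ++ [i]) := by
  by_cases h : d.contains k
  · simp [h]
  · simp only [Bool.not_eq_true] at h
    simp only [h, Bool.false_eq_true, if_false, PySem.Dict.modify]
    rw [PySem.Dict.getD_insert_self, PySem.Dict.insert_insert_self,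
        PySem.Dict.getD_of_not_contains _ _ h]

-- the value A's grouping dict stores at key k
theorem pv_group_getD (us : List (List (String × String))) (k : String) :
    ((us.foldl (fun d i => d.modify (pvCid i) [] (fun g => g ++ [i])) PySem.Dict.empty).getD k [])
      = us.filter (fun i => pvCid i == k) := by
  have hfold : us.foldl (fun d i => d.modify (pvCid i) [] (fun g => g ++ [i])) PySem.Dict.empty
      = (us.map (fun i => (pvCid i, i))).foldl (fun d p => d.modify p.1 [] (fun g => g ++ [p.2])) PySem.Dict.empty := by
    rw [List.foldl_map]
  rw [hfold, PySem.Dict.getD_foldl_modify_append, List.filter_map, List.map_map]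
  simp [Function.comp_def]

-- each value-list step adds (length - 1) when the list is nonempty
theorem pv_contrib (g : List (List (String × String))) (fu : Int) (hg : g ≠ []) :
    (if g.length > 1 then
        (PySem.List.pyRange 1 (g.length : Int) 1).foldl (fun fu _ => fu + 1) fu
      else fu) = fu + ((g.length : Int) - 1) := by
  by_cases h : g.length > 1
  · simp only [h, if_true]
    rw [show (fun (fu : Int) (_ : Int) => fu + 1) = fun acc x => acc + (fun _ => (1:Int)) x from rfl,
        PySem.List.foldl_add, PySem.List.sum_map_const_int, PySem.List.length_pyRange_one]
    have : ((g.length : Int) - 1).toNat = g.length - 1 := by omega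
    rw [this]
    have h1 : 1 ≤ g.length := by omega
    push_cast [h1]
    ring
  · have : g.length = 1 := by
      have := List.length_pos_iff.mpr hg; omega
    simp [this]

-- A's final loop is the sum of (length - 1) over the (nonempty) value lists
theorem pv_sum_contrib (vs : List (List (List (String × String)))) (acc : Int)
    (h : ∀ g ∈ vs, g ≠ []) :
    vs.foldl (fun fu g =>
      if g.length > 1 then
        (PySem.List.pyRange 1 (g.length : Int) 1).foldl (fun fu _ => fu + 1) fu
      else fu) acc = acc + (vs.map (fun g => (g.length : Int) - 1)).sum := by
  induction vs generalizing acc with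
  | nil => simp
  | cons g t ih =>
    simp only [List.foldl_cons, List.map_cons, List.sum_cons]
    rw [pv_contrib g acc (h g (by simp)), ih _ (fun g' hg' => h g' (by simp [hg']))]
    ring

-- sum of counts over the distinct elements equals the length
theorem pv_sum_count (ms : List String) :
    ((PySem.Set.ofList ms).map (fun k => (ms.count k : Int))).sum = (ms.length : Int) := by
  have hperm : (PySem.Set.ofList ms).Perm ms.dedup := by
    rw [List.perm_ext_iff_of_nodup (PySem.Set.nodup_ofList ms) (List.nodup_dedup ms)]
    intro a
    rw [PySem.Set.mem_ofList, List.mem_dedup]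
  calc ((PySem.Set.ofList ms).map (fun k => (ms.count k : Int))).sum
      = (ms.dedup.map (fun k => (ms.count k : Int))).sum :=
        (hperm.map (fun k => (ms.count k : Int))).sum_eq
    _ = ((ms.dedup.map (fun k => ms.count k)).sum : Int) := by
        rw [Nat.cast_list_sum, List.map_map]; rfl
    _ = (ms.length : Int) := by rw [List.sum_map_count_dedup_eq_length]

-- A in closed form: |filtered-and-sorted| - #distinct course ids
theorem pv_A_closed (interactions : List (List (String × String))) (user_email : String) :
    detect_follow_up_questions interactions user_email
      = (((interactions.filter (pvMatch user_email)).length : Int)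
          - ((PySem.Set.ofList ((interactions.filter (pvMatch user_email)).map pvCid)).length : Int)) := by
  simp only [detect_follow_up_questions]
  show ((PySem.List.sorted (interactions.filter (pvMatch user_email))
          (fun x => (PySem.Dict.mk x).getD "created" "") false).foldl
        (fun d i => (if d.contains (pvCid i) then d else d.insert (pvCid i) []).modify (pvCid i) []
          (fun g => g ++ [i]))
        PySem.Dict.empty).values.foldl
      (fun (fu : Int) g => if g.length > 1 then
          (PySem.List.pyRange 1 (g.length : Int) 1).foldl (fun fu _ => fu + 1) fu
        else fu) (0 : Int)
    = _
  set us := PySem.List.sorted (interactions.filter (pvMatch user_email))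
      (fun x => (PySem.Dict.mk x).getD "created" "") false with hus
  have hperm : us.Perm (interactions.filter (pvMatch user_email)) :=
    PySem.List.sorted_perm _ _ false
  -- the grouping dict, with the conditional insert removed
  have hstep : us.foldl
        (fun d i => (if d.contains (pvCid i) then d else d.insert (pvCid i) []).modify (pvCid i) []
          (fun g => g ++ [i])) PySem.Dict.empty
      = us.foldl (fun d i => d.modify (pvCid i) [] (fun g => g ++ [i])) PySem.Dict.empty := by
    apply PySem.List.foldl_congr_mem
    intro d i _
    exact pv_step_eq d (pvCid i) i
  rw [hstep]
  set D := us.foldl (fun d i => d.modify (pvCid i) [] (fun g => g ++ [i])) PySem.Dict.empty with hD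
  have hkeys : D.keys = PySem.Set.ofList (us.map pvCid) := by
    rw [hD, PySem.Dict.keys_foldl_modify_key us pvCid [] (fun _ i => fun g => g ++ [i])]
    rfl
  have hnodup : D.keys.Nodup := by
    rw [hkeys]; exact PySem.Set.nodup_ofList _
  have hvals : D.values = D.keys.map (fun k => D.getD k []) :=
    PySem.Dict.values_eq_map_keys D hnodup []
  have hgetD : ∀ k, D.getD k [] = us.filter (fun i => pvCid i == k) := fun k => pv_group_getD us k
  have hne : ∀ g ∈ D.values, g ≠ [] := by
    intro g hg
    rw [hvals] at hg
    obtain ⟨k, hk, rfl⟩ := List.mem_map.mp hg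
    rw [hkeys, PySem.Set.mem_ofList] at hk
    obtain ⟨i, hi, rfl⟩ := List.mem_map.mp hk
    rw [hgetD]
    intro hnil
    have : i ∈ us.filter (fun j => pvCid j == pvCid i) := by
      rw [List.mem_filter]; exact ⟨hi, by simp⟩
    rw [hnil] at this; exact absurd this (List.not_mem_nil)
  rw [pv_sum_contrib D.values 0 hne, hvals, List.map_map]
  set ms := us.map pvCid with hms
  have hlenfilter : ∀ k, ((us.filter (fun i => pvCid i == k)).length : Int) = (ms.count k : Int) := by
    intro k
    rw [hms, List.count, List.countP_map]
    rw [← List.countP_eq_length_filter]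
    rfl
  have hmapeq : D.keys.map ((fun g => (g.length : Int) - 1) ∘ fun k => D.getD k [])
      = D.keys.map (fun k => (ms.count k : Int) + (-1)) := by
    apply List.map_congr_left
    intro k _
    simp only [Function.comp]
    rw [hgetD k, ← hlenfilter k]
    ring
  rw [hmapeq, hkeys, PySem.List.sum_map_add_int, PySem.List.sum_map_const_int, pv_sum_count]
  have h1 : ms.length = (interactions.filter (pvMatch user_email)).length := by
    rw [hms, List.length_map, hperm.length_eq]
  have h2 : (PySem.Set.ofList ms).length
      = (PySem.Set.ofList ((interactions.filter (pvMatch user_email)).map pvCid)).length := by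
    have : (PySem.Set.ofList ms).Perm
        (PySem.Set.ofList ((interactions.filter (pvMatch user_email)).map pvCid)) := by
      rw [List.perm_ext_iff_of_nodup (PySem.Set.nodup_ofList _) (PySem.Set.nodup_ofList _)]
      intro a
      rw [PySem.Set.mem_ofList, PySem.Set.mem_ofList]
      exact (hperm.map pvCid).mem_iff
    exact this.length_eq
  rw [h1, h2]
  ring

-- B in the same closed form
theorem pv_B_closed (interactions : List (List (String × String))) (user_email : String) :
    detect_follow_up_questions_alt interactions user_email
      = (((interactions.filter (pvMatch user_email)).length : Int)
          - ((PySem.Set.ofList ((interactions.filter (pvMatch user_email)).map pvCid)).length : Int)) := by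
  unfold detect_follow_up_questions_alt
  rw [PySem.List.foldl_if_eq_foldl_filter
        (p := fun i => (PySem.Dict.mk i).get? "email" == some user_email)
        (f := fun (st : Int × PySem.Set String) i =>
          (st.1 + 1, PySem.Set.add st.2 ((PySem.Dict.mk i).getD "course_id" "unknown")))]
  rw [PySem.List.foldl_prod_mk (f := fun (a : Int) _ => a + 1)
        (g := fun (s : PySem.Set String) i => PySem.Set.add s ((PySem.Dict.mk i).getD "course_id" "unknown"))]
  rw [show (fun (a : Int) (_ : List (String × String)) => a + 1)
        = fun acc x => acc + (fun _ => (1:Int)) x from rfl, PySem.List.foldl_add,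
      PySem.List.sum_map_const_int]
  rw [← PySem.Set.update_map_eq_foldl_add _ (fun i => (PySem.Dict.mk i).getD "course_id" "unknown"),
      PySem.Set.update_empty]
  show (0 + ((interactions.filter (pvMatch user_email)).length : Int) * 1)
      - PySem.Set.len (PySem.Set.ofList ((interactions.filter (pvMatch user_email)).map pvCid)) = _
  simp only [PySem.Set.len]
  ring

-- ===== VERDICT (by name: the statement is the Claim_ definition above) =====
theorem detect_follow_up_questions_spec : Claim_equal_detect_follow_up_questions := by
  intro interactions user_email _
  unfold Spec_detect_follow_up_questions
  rw [pv_A_closed, pv_B_closed]
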